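-- pv_equiv track=rewrite | github.com/baiyang4/TST-action-segmentation | scripts/visualize.py | get_segment_idx
-- ===== SOURCE A (Python) =====
-- def get_segment_idx(sequence):
--     """Extract segment boundaries and labels from frame-level predictions."""
--     seg_time = [0]
--     seg_label = [sequence[0]]
--     for i, s in enumerate(sequence):
--         if s != seg_label[-1]:
--             seg_time.append(i)
--             seg_label.append(s)
--     seg_time.append(len(sequence))
--     return seg_time, seg_label
-- ===== SOURCE B (Python) =====
-- def get_segment_idx(sequence):
--     """Extract segment boundaries and labels from frame-level predictions.
--
--     Group-then-accumulate decomposition: first collapse the sequence into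
--     consecutive equal-value runs (label, length), then the labels are the run
--     keys and the boundaries are zero followed by the running prefix sums of
--     the run lengths.
--     """
--     runs = []
--     for s in sequence:
--         if runs and runs[-1][0] == s:
--             runs[-1][1] += 1
--         else:
--             runs.append([s, 1])
--     seg_label = [k for k, _ in runs]
--     seg_time = [0]
--     total = 0
--     for _, n in runs:
--         total += n
--         seg_time.append(total)
--     return seg_time, seg_label
-- ===== Notes on version B (the rewrite author's own statement) =====
-- stated objective: alternative
-- what changed: Replaces A's single-pass per-frame change detection against the last recorded label by a group-then-accumulate decomposition: first collapse the sequence into consecutive equal-value runs of (label, length), then take the run labels, and zero followed by the running prefix sums of the run lengths as boundaries.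
import Mathlib
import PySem

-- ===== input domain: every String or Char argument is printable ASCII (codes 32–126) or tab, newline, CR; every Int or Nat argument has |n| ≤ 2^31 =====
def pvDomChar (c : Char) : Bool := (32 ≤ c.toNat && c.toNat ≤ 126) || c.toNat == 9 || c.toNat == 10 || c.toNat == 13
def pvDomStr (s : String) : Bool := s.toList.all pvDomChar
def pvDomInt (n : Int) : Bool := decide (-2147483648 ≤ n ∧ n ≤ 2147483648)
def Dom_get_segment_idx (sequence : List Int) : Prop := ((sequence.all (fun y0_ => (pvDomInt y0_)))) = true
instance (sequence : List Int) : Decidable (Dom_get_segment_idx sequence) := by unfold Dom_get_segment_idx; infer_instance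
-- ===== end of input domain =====

-- B replaces per-frame change detection by a group-into-runs-then-prefix-sum decomposition (objective: alternative, same cost).

-- ===== PORT A =====
-- loop body of A: append i and s when s differs from the last seg_label entry
-- (seg_label is never empty when its last entry is read, so the .getD 0 default is dead)
def pvStepA (acc : List Int × List Int) (p : Int × Int) : List Int × List Int :=
  if p.2 ≠ (PySem.List.pyGet? acc.2 (-1)).getD 0 then (acc.1 ++ [p.1], acc.2 ++ [p.2]) else acc

def get_segment_idx (sequence : List Int) : List Int × List Int :=
  let seg_time : List Int := [0]
  let seg_label : List Int := [(PySem.List.pyGet? sequence 0).getD 0]  -- first element; Pre_ excludes the IndexError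
  let st := (PySem.List.enumerate sequence 0).foldl pvStepA (seg_time, seg_label)
  (st.1 ++ [(sequence.length : Int)], st.2)

-- ===== PORT B =====
-- body of B's first loop: extend the last open run or start a new one
def pvRunStep (runs : List (Int × Int)) (s : Int) : List (Int × Int) :=
  match runs.getLast? with
  | some (k, n) => if k = s then runs.dropLast ++ [(k, n + 1)] else runs ++ [(s, 1)]
  | none => runs ++ [(s, 1)]

-- body of B's second loop: 'total += n; seg_time.append(total)'
def pvTimeStep (acc : List Int × Int) (p : Int × Int) : List Int × Int :=
  (acc.1 ++ [acc.2 + p.2], acc.2 + p.2)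

def get_segment_idx_alt (sequence : List Int) : List Int × List Int :=
  let runs := sequence.foldl pvRunStep []
  let seg_label := runs.map Prod.fst
  let seg_time := (runs.foldl pvTimeStep ([0], 0)).1
  (seg_time, seg_label)

-- ===== PRECONDITION & SPEC =====
-- Pre_ excludes only the empty sequence, on which A raises IndexError reading the first element.
def Pre_get_segment_idx (sequence : List Int) : Prop := sequence ≠ []
instance (sequence : List Int) : Decidable (Pre_get_segment_idx sequence) := by unfold Pre_get_segment_idx; infer_instance
def pvWitness_get_segment_idx : List Int := [1, 1, 2]

def Spec_get_segment_idx (sequence : List Int) (out : List Int × List Int) : Prop := out = get_segment_idx_alt sequence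
instance (sequence : List Int) (out : List Int × List Int) : Decidable (Spec_get_segment_idx sequence out) := by unfold Spec_get_segment_idx; infer_instance

-- ===== CLAIM (what is proved, stated in full; the proofs are below) =====
def Claim_equal_get_segment_idx : Prop := ∀ (sequence : List Int), Dom_get_segment_idx sequence → Pre_get_segment_idx sequence → Spec_get_segment_idx sequence (get_segment_idx sequence)

-- ===== LEMMAS AND PROOFS =====

-- reference recursion for A's loop: from index i, current run label cur,
-- the times/labels still to be appended
def refA (i : Int) (cur : Int) : List Int → List Int × List Int
  | [] => ([], [])
  | x :: xs =>
    if x ≠ cur then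
      let r := refA (i + 1) x xs
      (i :: r.1, x :: r.2)
    else refA (i + 1) cur xs

-- reference recursion for B's run grouping: current open run (cur, n)
def refB (cur : Int) (n : Int) : List Int → List (Int × Int)
  | [] => [(cur, n)]
  | x :: xs => if cur = x then refB cur (n + 1) xs else (cur, n) :: refB x 1 xs

-- prefix sums of run lengths starting from total t0
def timesFrom (t0 : Int) : List (Int × Int) → List Int
  | [] => []
  | p :: rest => (t0 + p.2) :: timesFrom (t0 + p.2) rest

theorem foldA_eq (xs : List Int) : ∀ (i : Int) (T L : List Int) (cur : Int),
    (PySem.List.enumerate xs i).foldl pvStepA (T, L ++ [cur]) =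
      (T ++ (refA i cur xs).1, (L ++ [cur]) ++ (refA i cur xs).2) := by
  induction xs with
  | nil => intro i T L cur; simp [PySem.List.enumerate_nil, refA]
  | cons x xs ih =>
    intro i T L cur
    rw [PySem.List.enumerate_cons]
    by_cases hx : x = cur
    · subst hx
      have : pvStepA (T, L ++ [x]) (i, x) = (T, L ++ [x]) := by
        simp [pvStepA, PySem.List.pyGet?_neg_one_append_singleton]
      simp only [List.foldl_cons, this, refA, ih]
      simp
    · have : pvStepA (T, L ++ [cur]) (i, x) = (T ++ [i], (L ++ [cur]) ++ [x]) := by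
        simp [pvStepA, PySem.List.pyGet?_neg_one_append_singleton, hx]
      simp only [List.foldl_cons, this]
      rw [ih (i + 1) (T ++ [i]) (L ++ [cur]) x]
      simp [refA, hx]

theorem foldB_eq (xs : List Int) : ∀ (rs : List (Int × Int)) (k n : Int),
    xs.foldl pvRunStep (rs ++ [(k, n)]) = rs ++ refB k n xs := by
  induction xs with
  | nil => intro rs k n; simp [refB]
  | cons x xs ih =>
    intro rs k n
    by_cases hk : k = x
    · have hs : pvRunStep (rs ++ [(k, n)]) x = rs ++ [(k, n + 1)] := by
        simp [pvRunStep, hk]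
      rw [List.foldl_cons, hs, ih rs k (n + 1)]
      simp [refB, hk]
    · have hs : pvRunStep (rs ++ [(k, n)]) x = (rs ++ [(k, n)]) ++ [(x, 1)] := by
        simp [pvRunStep, hk]
      rw [List.foldl_cons, hs, ih (rs ++ [(k, n)]) x 1]
      simp [refB, hk]

theorem foldTime_eq (runs : List (Int × Int)) : ∀ (T : List Int) (t0 : Int),
    (runs.foldl pvTimeStep (T, t0)).1 = T ++ timesFrom t0 runs := by
  induction runs with
  | nil => intro T t0; simp [timesFrom]
  | cons p rest ih =>
    intro T t0
    rw [List.foldl_cons]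
    show (rest.foldl pvTimeStep (T ++ [t0 + p.2], t0 + p.2)).1 = _
    rw [ih]
    simp [timesFrom]

theorem refB_head (xs : List Int) : ∀ (k n : Int), ∃ m rest, refB k n xs = (k, m) :: rest := by
  induction xs with
  | nil => intro k n; exact ⟨n, [], rfl⟩
  | cons x xs ih =>
    intro k n
    by_cases hk : k = x
    · subst hk
      obtain ⟨m, rest, h⟩ := ih k (n + 1)
      exact ⟨m, rest, by simp [refB, h]⟩
    · exact ⟨n, refB x 1 xs, by simp [refB, hk]⟩

theorem core (xs : List Int) : ∀ (cur n t0 : Int),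
    (refA (t0 + n) cur xs).1 ++ [t0 + n + xs.length] = timesFrom t0 (refB cur n xs) ∧
    (refA (t0 + n) cur xs).2 = (refB cur n xs).tail.map Prod.fst := by
  induction xs with
  | nil => intro cur n t0; simp [refA, refB, timesFrom]
  | cons x xs ih =>
    intro cur n t0
    by_cases hx : x = cur
    · subst hx
      obtain ⟨h1, h2⟩ := ih x (n + 1) t0
      have e1 : refA (t0 + n) x (x :: xs) = refA (t0 + n + 1) x xs := by simp [refA]
      have e2 : refB x n (x :: xs) = refB x (n + 1) xs := by simp [refB]
      have eq1 : t0 + n + 1 = t0 + (n + 1) := by ring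
      rw [e1, e2, eq1]
      refine ⟨?_, h2⟩
      rw [← h1]
      congr 2
      push_cast [List.length_cons]
      ring
    · have hcx : ¬ (cur = x) := fun he => hx he.symm
      obtain ⟨h1, h2⟩ := ih x 1 (t0 + n)
      obtain ⟨m, rest, hB⟩ := refB_head xs x 1
      have e1 : refA (t0 + n) cur (x :: xs) =
          ((t0 + n) :: (refA (t0 + n + 1) x xs).1, x :: (refA (t0 + n + 1) x xs).2) := by
        simp [refA, hx]
      have e2 : refB cur n (x :: xs) = (cur, n) :: refB x 1 xs := by simp [refB, hcx]
      constructor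
      · rw [e1, e2, timesFrom]
        simp only [List.cons_append, List.cons.injEq]
        refine ⟨trivial, ?_⟩
        rw [← h1]
        congr 2
        push_cast [List.length_cons]
        ring
      · rw [e1, e2, List.tail_cons]
        rw [hB] at h2 ⊢
        simp only [List.tail_cons] at h2
        simp [h2]

-- ===== VERDICT (by name: the statement is the Claim_ definition above) =====
theorem get_segment_idx_spec : Claim_equal_get_segment_idx := by
  intro sequence _ hpre
  unfold Spec_get_segment_idx
  obtain ⟨x, xs, rfl⟩ : ∃ y ys, sequence = y :: ys := by
    cases sequence with
    | nil => exact absurd rfl hpre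
    | cons y ys => exact ⟨y, ys, rfl⟩
  unfold get_segment_idx get_segment_idx_alt
  simp only []
  -- A side: the first enumerated frame leaves the initial state unchanged
  rw [PySem.List.enumerate_cons, List.foldl_cons,
      show ([(PySem.List.pyGet? (x :: xs) 0).getD 0] : List Int) = ([] : List Int) ++ [x] by
        simp,
      show pvStepA (([0] : List Int), ([] : List Int) ++ [x]) (0, x) = (([0] : List Int), ([] : List Int) ++ [x]) by
        simp [pvStepA, PySem.List.pyGet?_neg_one],
      show (0 : Int) + 1 = 1 by norm_num,
      foldA_eq xs 1 [0] [] x]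
  -- B side: the first frame opens the run (x, 1)
  rw [List.foldl_cons,
      show pvRunStep ([] : List (Int × Int)) x = ([] : List (Int × Int)) ++ [(x, 1)] by simp [pvRunStep],
      foldB_eq xs [] x 1]
  simp only [List.nil_append]
  rw [foldTime_eq]
  obtain ⟨m, rest, hB⟩ := refB_head xs x 1
  have hcore := core xs x 1 0
  simp only [zero_add] at hcore
  rw [Prod.mk.injEq]
  have hlen : (((x :: xs).length : Int)) = 1 + (xs.length : Int) := by
    push_cast [List.length_cons]; ring
  constructor
  · rw [List.append_assoc, hlen, hcore.1]
  · rw [hB, List.map_cons]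
    have h2 := hcore.2
    rw [hB] at h2
    simp only [List.tail_cons] at h2
    rw [h2]
    simp
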